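-- pv_equiv track=rewrite | github.com/RushabhShahPrograms/30DaysOfCode | Day 28/task-hare.py | solve
-- ===== SOURCE A (Python) =====
-- def solve(tasks, people):
--     tasks.sort()
--     people.sort()
--     ct=0
--     ind=0
--     for i in range(len(people)):
--         for j in range(ind,len(tasks)):
--             if people[i]>=tasks[j]:
--                 ct+=1
--                 ind+=1
--                 break
--             else:
--                 break
--     return ct
-- ===== SOURCE B (Python) =====
-- def solve(tasks, people):
--     tasks.sort()
--     people.sort()
--     n, m = len(tasks), len(people)
--
--     def feasible(k):
--         # the k easiest tasks can all be handled by the k strongest people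
--         return all(tasks[i] <= people[m - k + i] for i in range(k))
--
--     lo, hi = 0, min(n, m)
--     while lo < hi:
--         k = (lo + hi + 1) // 2
--         if feasible(k):
--             lo = k
--         else:
--             hi = k - 1
--     return lo
-- ===== Notes on version B (the rewrite author's own statement) =====
-- stated objective: alternative
-- what changed: replaced A's greedy pointer sweep over people/tasks by a binary search on the answer k with a feasibility check 'the k easiest tasks fit the k strongest people'
import Mathlib
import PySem

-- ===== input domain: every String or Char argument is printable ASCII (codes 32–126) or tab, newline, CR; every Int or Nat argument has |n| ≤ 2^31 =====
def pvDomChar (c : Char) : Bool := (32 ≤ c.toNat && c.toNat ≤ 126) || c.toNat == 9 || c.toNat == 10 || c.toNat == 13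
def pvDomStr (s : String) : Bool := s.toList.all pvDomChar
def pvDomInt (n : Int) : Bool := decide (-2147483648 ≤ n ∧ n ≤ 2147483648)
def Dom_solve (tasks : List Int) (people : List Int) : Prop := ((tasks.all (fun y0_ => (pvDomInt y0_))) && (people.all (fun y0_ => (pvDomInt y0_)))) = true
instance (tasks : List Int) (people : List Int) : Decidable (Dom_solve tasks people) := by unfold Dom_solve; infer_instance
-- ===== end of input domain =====

-- B replaces A's greedy pointer sweep by a binary search on the answer k, checking feasibility
-- "the k easiest tasks fit the k strongest people" (alternative algorithm, similar cost).
-- Both A and B sort their list arguments in place; the equivalence proved here is about the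
-- return value (B performs the same mutation).

-- ===== PORT A =====
-- inner `for j in range(ind, len(tasks))`: both branches break at the first j, so only the head
-- of the range is ever inspected; indices produced by the ranges are in range, so pyGetD is exact
def solveInnerA (p : Int) (tasks : List Int) : List Int → Int × Int → Int × Int
  | [], st => st
  | j :: _, (ct, ind) =>
      if p ≥ PySem.List.pyGetD tasks j 0 then (ct + 1, ind + 1)
      else (ct, ind)

-- outer `for i in range(len(people))`
def solveOuterA (tasks people : List Int) : List Int → Int × Int → Int × Int
  | [], st => st
  | i :: is, st =>
      solveOuterA tasks people is
        (solveInnerA (PySem.List.pyGetD people i 0) tasks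
          (PySem.List.pyRange st.2 (tasks.length : Int) 1) st)

def solve (tasks : List Int) (people : List Int) : Int :=
  let tasks := PySem.List.sorted tasks (fun x => x) false
  let people := PySem.List.sorted people (fun x => x) false
  (solveOuterA tasks people (PySem.List.pyRange 0 (people.length : Int) 1) (0, 0)).1

-- ===== PORT B =====
-- `all(tasks[i] <= people[m - k + i] for i in range(k))`; inside the search 0 ≤ k ≤ min(n, m),
-- so every index is in range and getD is exact
def feasB (ts ps : List Int) (k : Nat) : Bool :=
  (List.range k).all (fun i => decide (ts.getD i 0 ≤ ps.getD (ps.length - k + i) 0))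

-- the `while lo < hi` binary-search loop of Source B (lo, hi are the nonnegative Python ints)
def bsearch (ts ps : List Int) (lo hi : Nat) : Nat :=
  if _h : lo < hi then
    if feasB ts ps ((lo + hi + 1) / 2) then bsearch ts ps ((lo + hi + 1) / 2) hi
    else bsearch ts ps lo ((lo + hi + 1) / 2 - 1)
  else lo
termination_by hi - lo
decreasing_by all_goals omega

def solve_alt (tasks : List Int) (people : List Int) : Int :=
  let ts := PySem.List.sorted tasks (fun x => x) false
  let ps := PySem.List.sorted people (fun x => x) false
  ((bsearch ts ps 0 (min ts.length ps.length) : Nat) : Int)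

-- ===== PRECONDITION & SPEC =====
def Spec_solve (tasks : List Int) (people : List Int) (out : Int) : Prop := out = solve_alt tasks people
instance (tasks : List Int) (people : List Int) (out : Int) : Decidable (Spec_solve tasks people out) := by unfold Spec_solve; infer_instance

-- ===== CLAIM (what is proved, stated in full; the proofs are below) =====
def Claim_equal_solve : Prop := ∀ (tasks : List Int) (people : List Int), Dom_solve tasks people → Spec_solve tasks people (solve tasks people)

-- ===== LEMMAS AND PROOFS =====

-- reference count: the greedy one-task-pointer matching on the two sorted lists (Int-valued, for A)
def gRef : List Int → List Int → Int
  | _, [] => 0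
  | [], _ :: ps => gRef [] ps
  | t :: ts, p :: ps => if t ≤ p then 1 + gRef ts ps else gRef (t :: ts) ps
termination_by ts ps => ps.length

theorem gRef_nil_left : ∀ (ps : List Int), gRef [] ps = 0
  | [] => by rw [gRef]
  | _ :: ps => by rw [gRef]; exact gRef_nil_left ps

-- A's outer loop from index i with ct/ind state computes gRef on the drops
theorem outerA_eq (N : Nat) : ∀ (tasks people : List Int) (i : Nat) (ct : Int) (k : Nat),
    people.length - i ≤ N →
    solveOuterA tasks people (PySem.List.pyRange (i : Int) (people.length : Int) 1) (ct, (k : Int))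
      = (ct + gRef (tasks.drop k) (people.drop i),
         (k : Int) + gRef (tasks.drop k) (people.drop i)) := by
  induction N with
  | zero =>
    intro tasks people i ct k h
    have hi : people.length ≤ i := by omega
    rw [PySem.List.pyRange_one_eq_nil (show (people.length:Int) ≤ (i:Int) by exact_mod_cast hi),
        List.drop_eq_nil_of_le hi, gRef]
    simp [solveOuterA]
  | succ N IH =>
    intro tasks people i ct k h
    by_cases hi : people.length ≤ i
    · rw [PySem.List.pyRange_one_eq_nil (show (people.length:Int) ≤ (i:Int) by exact_mod_cast hi),
          List.drop_eq_nil_of_le hi, gRef]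
      simp [solveOuterA]
    · push_neg at hi
      rw [PySem.List.pyRange_one_cons (show (i:Int) < (people.length:Int) by exact_mod_cast hi), solveOuterA]
      have hpget : PySem.List.pyGetD people (i : Int) 0 = people[i] := by
        rw [PySem.List.pyGetD_natCast]; exact List.getD_eq_getElem _ _ hi
      have hdropP : people.drop i = people[i] :: people.drop (i + 1) :=
        List.drop_eq_getElem_cons hi
      have hcast : ((i : Int) + 1) = ((i + 1 : Nat) : Int) := by push_cast; ring
      by_cases hk : tasks.length ≤ k
      · -- range(ind, len(tasks)) is empty: inner loop does nothing
        rw [hpget,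
            PySem.List.pyRange_one_eq_nil (show (tasks.length:Int) ≤ (k:Int) by exact_mod_cast hk)]
        simp only [solveInnerA]
        rw [hcast, IH tasks people (i + 1) ct k (by omega), List.drop_eq_nil_of_le hk,
            hdropP, gRef]
      · push_neg at hk
        rw [hpget, PySem.List.pyRange_one_cons (show (k:Int) < (tasks.length:Int) by exact_mod_cast hk)]
        have htget : PySem.List.pyGetD tasks (k : Int) 0 = tasks[k] := by
          rw [PySem.List.pyGetD_natCast]; exact List.getD_eq_getElem _ _ hk
        have hdropT : tasks.drop k = tasks[k] :: tasks.drop (k + 1) :=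
          List.drop_eq_getElem_cons hk
        simp only [solveInnerA, htget, ge_iff_le]
        by_cases hcmp : tasks[k] ≤ people[i]
        · rw [if_pos hcmp]
          have hcast' : ((k : Int) + 1) = ((k + 1 : Nat) : Int) := by push_cast; ring
          rw [hcast, hcast', IH tasks people (i + 1) (ct + 1) (k + 1) (by omega)]
          rw [hdropP, hdropT, gRef, if_pos hcmp, Prod.mk.injEq]
          refine ⟨by push_cast; ring, by push_cast; ring⟩
        · rw [if_neg hcmp]
          rw [hcast, IH tasks people (i + 1) ct k (by omega)]
          rw [hdropP, hdropT, gRef, if_neg hcmp]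

-- Nat-valued greedy count, for the B-side reasoning
def gN : List Int → List Int → Nat
  | _, [] => 0
  | [], _ :: ps => gN [] ps
  | t :: ts, p :: ps => if t ≤ p then gN ts ps + 1 else gN (t :: ts) ps
termination_by ts ps => ps.length

theorem gN_nil_left : ∀ (ps : List Int), gN [] ps = 0
  | [] => by rw [gN]
  | _ :: ps => by rw [gN]; exact gN_nil_left ps

theorem gRef_eq_gN : ∀ (ps ts : List Int), gRef ts ps = (gN ts ps : Int)
  | [], ts => by rw [gRef, gN]; simp
  | p :: ps, [] => by
      rw [gRef, gN, gRef_nil_left, gN_nil_left]; simp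
  | p :: ps, t :: ts => by
      rw [gRef, gN]
      by_cases hc : t ≤ p
      · rw [if_pos hc, if_pos hc, gRef_eq_gN ps ts]; push_cast; ring
      · rw [if_neg hc, if_neg hc]; exact gRef_eq_gN ps (t :: ts)
termination_by ps ts => ps.length

-- feasibility of answer k: the k easiest tasks fit the k strongest people
def Feas (ts ps : List Int) (k : Nat) : Prop :=
  k ≤ ts.length ∧ k ≤ ps.length ∧ ∀ i < k, ts.getD i 0 ≤ ps.getD (ps.length - k + i) 0

theorem feasB_iff (ts ps : List Int) (k : Nat) :
    feasB ts ps k = true ↔ ∀ i < k, ts.getD i 0 ≤ ps.getD (ps.length - k + i) 0 := by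
  simp [feasB, List.all_eq_true, List.mem_range]

theorem getD_head_le (p : Int) (ps : List Int) (h : (p :: ps).Pairwise (· ≤ ·))
    {j : Nat} (hj : j < ps.length) : p ≤ ps.getD j 0 := by
  rw [List.getD_eq_getElem ps 0 hj]
  exact (List.pairwise_cons.mp h).1 _ (List.getElem_mem hj)

theorem getD_mono (ps : List Int) (h : ps.Pairwise (· ≤ ·)) {a b : Nat}
    (hab : a ≤ b) (hb : b < ps.length) : ps.getD a 0 ≤ ps.getD b 0 := by
  rcases Nat.eq_or_lt_of_le hab with rfl | hlt
  · exact le_refl _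
  · rw [List.getD_eq_getElem ps 0 (lt_trans hlt hb), List.getD_eq_getElem ps 0 hb]
    exact List.pairwise_iff_getElem.mp h a b _ hb hlt

-- the greedy count is feasible
theorem gN_feas : ∀ (ps ts : List Int), ps.Pairwise (· ≤ ·) → Feas ts ps (gN ts ps)
  | [], ts, _ => by
      rw [gN]
      exact ⟨Nat.zero_le _, Nat.zero_le _, fun i hi => absurd hi (by omega)⟩
  | p :: ps, [], _ => by
      rw [gN, gN_nil_left]
      exact ⟨Nat.zero_le _, Nat.zero_le _, fun i hi => absurd hi (by omega)⟩
  | p :: ps, t :: ts, hp => by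
      have hps : ps.Pairwise (· ≤ ·) := (List.pairwise_cons.mp hp).2
      rw [gN]
      by_cases hc : t ≤ p
      · rw [if_pos hc]
        obtain ⟨h1, h2, h3⟩ := gN_feas ps ts hps
        refine ⟨by simpa using Nat.succ_le_succ h1, by simpa using Nat.succ_le_succ h2, ?_⟩
        intro i hi
        match i with
        | 0 =>
          have hidx : ps.length + 1 - (gN ts ps + 1) + 0 = ps.length - gN ts ps := by omega
          rw [List.length_cons, hidx, List.getD_cons_zero]
          by_cases hkm : gN ts ps = ps.length
          · rw [hkm, Nat.sub_self, List.getD_cons_zero]; exact hc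
          · have hlt : gN ts ps < ps.length := lt_of_le_of_ne h2 hkm
            have hidx2 : ps.length - gN ts ps = (ps.length - gN ts ps - 1) + 1 := by omega
            rw [hidx2, List.getD_cons_succ]
            exact le_trans hc (getD_head_le p ps hp (by omega))
        | j + 1 =>
          have hj : j < gN ts ps := by omega
          have hidx : ps.length + 1 - (gN ts ps + 1) + (j + 1)
              = (ps.length - gN ts ps + j) + 1 := by omega
          rw [List.length_cons, hidx, List.getD_cons_succ, List.getD_cons_succ]
          exact h3 j hj
      · rw [if_neg hc]
        obtain ⟨h1, h2, h3⟩ := gN_feas ps (t :: ts) hps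
        refine ⟨h1, le_trans h2 (by simp), ?_⟩
        intro i hi
        have hidx : ps.length + 1 - gN (t :: ts) ps + i
            = (ps.length - gN (t :: ts) ps + i) + 1 := by omega
        rw [List.length_cons, hidx, List.getD_cons_succ]
        exact h3 i hi
termination_by ps ts => ps.length

-- any feasible k is at most the greedy count
theorem feas_le_gN : ∀ (ps ts : List Int) (k : Nat), ps.Pairwise (· ≤ ·) →
    Feas ts ps k → k ≤ gN ts ps
  | [], ts, k, _, h => by
      have := h.2.1; simp at this; omega
  | p :: ps, [], k, _, h => by
      have := h.1; simp at this; omega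
  | p :: ps, t :: ts, k, hp, h => by
      have hps : ps.Pairwise (· ≤ ·) := (List.pairwise_cons.mp hp).2
      obtain ⟨hkn, hkm, hcond⟩ := h
      match k with
      | 0 => exact Nat.zero_le _
      | k'' + 1 =>
        rw [gN]
        by_cases hc : t ≤ p
        · rw [if_pos hc]
          have hk'' : k'' ≤ gN ts ps := by
            refine feas_le_gN ps ts k'' hps ⟨by simp at hkn; omega, by simp at hkm; omega, ?_⟩
            intro i hi
            have := hcond (i + 1) (by omega)
            have hidx : ps.length + 1 - (k'' + 1) + (i + 1)
                = (ps.length - k'' + i) + 1 := by simp at hkm; omega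
            rw [List.length_cons, hidx, List.getD_cons_succ, List.getD_cons_succ] at this
            exact this
          omega
        · rw [if_neg hc]
          have hkm' : k'' + 1 ≤ ps.length := by
            by_contra hcon
            have hke : k'' = ps.length := by simp at hkm; omega
            have := hcond 0 (by omega)
            have hidx : ps.length + 1 - (k'' + 1) + 0 = 0 := by omega
            rw [List.length_cons, hidx, List.getD_cons_zero, List.getD_cons_zero] at this
            exact hc this
          refine feas_le_gN ps (t :: ts) (k'' + 1) hps ⟨hkn, hkm', ?_⟩
          intro i hi
          have := hcond i hi
          have hidx : ps.length + 1 - (k'' + 1) + i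
              = (ps.length - (k'' + 1) + i) + 1 := by omega
          rw [List.length_cons, hidx, List.getD_cons_succ] at this
          exact this
termination_by ps ts => ps.length

-- feasibility is downward closed (people sorted ascending)
theorem Feas_mono (ts ps : List Int) (hp : ps.Pairwise (· ≤ ·)) {k k' : Nat}
    (h : Feas ts ps k) (hkk : k' ≤ k) : Feas ts ps k' := by
  obtain ⟨h1, h2, h3⟩ := h
  refine ⟨le_trans hkk h1, le_trans hkk h2, ?_⟩
  intro i hi
  exact le_trans (h3 i (by omega))
    (getD_mono ps hp (by omega) (by omega))

-- the binary search homes in on the greedy count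
theorem bsearch_eq (ts ps : List Int) (hp : ps.Pairwise (· ≤ ·)) :
    ∀ (N lo hi : Nat), hi - lo ≤ N → lo ≤ gN ts ps → gN ts ps ≤ hi →
    hi ≤ min ts.length ps.length → bsearch ts ps lo hi = gN ts ps := by
  intro N
  induction N with
  | zero =>
    intro lo hi hN hlo hhi _
    rw [bsearch, dif_neg (by omega : ¬ lo < hi)]
    omega
  | succ N IH =>
    intro lo hi hN hlo hhi hmin
    by_cases hlh : lo < hi
    · rw [bsearch, dif_pos hlh]
      by_cases hf : feasB ts ps ((lo + hi + 1) / 2) = true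
      · rw [if_pos hf]
        have hfe : Feas ts ps ((lo + hi + 1) / 2) :=
          ⟨by omega, by omega, (feasB_iff ts ps _).mp hf⟩
        have := feas_le_gN ps ts _ hp hfe
        exact IH _ hi (by omega) this hhi hmin
      · rw [if_neg hf]
        have hup : gN ts ps ≤ (lo + hi + 1) / 2 - 1 := by
          by_contra hcon
          exact hf ((feasB_iff ts ps _).mpr
            (Feas_mono ts ps hp (gN_feas ps ts hp) (by omega)).2.2)
        exact IH lo _ (by omega) hlo hup (by omega)
    · rw [bsearch, dif_neg hlh]
      omega

-- ===== VERDICT (by name: the statement is the Claim_ definition above) =====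
theorem solve_spec : Claim_equal_solve := by
  intro tasks people _
  unfold Spec_solve solve solve_alt
  set ts := PySem.List.sorted tasks (fun x => x) false with hts
  set ps := PySem.List.sorted people (fun x => x) false with hps
  have hsorted : ps.Pairwise (· ≤ ·) := PySem.List.sorted_pairwise people (fun x => x)
  have hA := outerA_eq ps.length ts ps 0 0 0 (by omega)
  simp only [Nat.cast_zero, List.drop_zero] at hA
  have hg := gN_feas ps ts hsorted
  have hB := bsearch_eq ts ps hsorted (min ts.length ps.length) 0 (min ts.length ps.length)
    (by omega) (Nat.zero_le _) (le_min hg.1 hg.2.1) (le_refl _)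
  show (solveOuterA ts ps (PySem.List.pyRange 0 (ps.length : Int) 1) (0, 0)).1
      = ((bsearch ts ps 0 (min ts.length ps.length) : Nat) : Int)
  rw [hA, hB, gRef_eq_gN]
  ring
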